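-- pv_equiv track=rewrite | github.com/trizist/agent-tool-templates | tools/global/make_time_series_predictions/custom_model/validate_and_fix.py | fix_columns_cases
-- ===== SOURCE A (Python) =====
-- def fix_columns_cases(cols_to_fix, cols_to_return):
--     if isinstance(cols_to_fix, str):
--         cols_to_fix = [cols_to_fix]
--     if isinstance(cols_to_return, str):
--         cols_to_return = [cols_to_return]
--     cols_to_fix = [col.lower() for col in cols_to_fix]
--     cols_to_return = {col.lower(): col for col in cols_to_return}
--     columns = []
--     for col in cols_to_fix:
--         if fixed_col := cols_to_return.get(col):
--             columns.append(fixed_col)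
--     return columns
-- ===== SOURCE B (Python) =====
-- def fix_columns_cases(cols_to_fix, cols_to_return):
--     if isinstance(cols_to_fix, str):
--         cols_to_fix = [cols_to_fix]
--     if isinstance(cols_to_return, str):
--         cols_to_return = [cols_to_return]
--     targets = [c.lower() for c in cols_to_fix]
--     # Stamp each available column into every slot whose target matches it;
--     # later columns overwrite earlier ones (last duplicate wins).
--     slots = [None] * len(targets)
--     for col in cols_to_return:
--         low = col.lower()
--         for i, t in enumerate(targets):
--             if t == low:
--                 slots[i] = col
--     return [s for s in slots if s]
-- ===== Notes on version B (the rewrite author's own statement) =====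
-- stated objective: alternative
-- what changed: Inverts the traversal: instead of a lowercase->original dict looked up per requested column, B allocates one slot per requested column and makes a single outer pass over cols_to_return, stamping each column into every slot whose lowered target matches (later columns overwrite, so the last duplicate wins), then collects the truthy slots in order.
import Mathlib
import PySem

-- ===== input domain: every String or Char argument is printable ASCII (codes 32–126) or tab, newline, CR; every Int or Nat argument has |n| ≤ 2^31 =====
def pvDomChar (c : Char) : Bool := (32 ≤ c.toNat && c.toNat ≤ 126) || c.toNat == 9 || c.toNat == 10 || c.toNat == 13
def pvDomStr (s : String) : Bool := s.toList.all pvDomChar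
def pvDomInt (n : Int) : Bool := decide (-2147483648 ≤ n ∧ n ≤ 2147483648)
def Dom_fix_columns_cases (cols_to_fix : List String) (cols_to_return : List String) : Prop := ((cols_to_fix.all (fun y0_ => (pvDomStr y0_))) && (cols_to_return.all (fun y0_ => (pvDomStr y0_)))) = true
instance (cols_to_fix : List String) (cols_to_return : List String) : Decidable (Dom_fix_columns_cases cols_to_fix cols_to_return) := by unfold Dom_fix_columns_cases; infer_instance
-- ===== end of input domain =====

-- B inverts the traversal: one outer pass over cols_to_return stamps each column into a
-- per-target slot array (later matches overwrite), then the truthy slots are collected;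
-- alternative decomposition, not faster.
-- ===== PORT A =====
-- Under the List String signature the isinstance(str) branches never fire, so they are omitted.
def fix_columns_cases (cols_to_fix : List String) (cols_to_return : List String) : List String :=
  let fixed := cols_to_fix.map PySem.Str.lower
  let d := cols_to_return.foldl (fun d c => d.insert (PySem.Str.lower c) c) (PySem.Dict.empty : PySem.Dict String String)
  fixed.foldl (fun columns col =>
    match d.get? col with
    | some fixed_col => if fixed_col ≠ "" then columns ++ [fixed_col] else columns
    | none => columns) []

-- ===== PORT B =====
def fix_columns_cases_alt (cols_to_fix : List String) (cols_to_return : List String) : List String :=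
  let targets := cols_to_fix.map PySem.Str.lower
  let slots := cols_to_return.foldl
    (fun slots col =>
      let low := PySem.Str.lower col
      (slots.zip targets).map (fun p => if p.2 == low then some col else p.1))
    (targets.map (fun _ => (none : Option String)))
  slots.foldl (fun acc s =>
    match s with
    | some v => if v ≠ "" then acc ++ [v] else acc
    | none => acc) []

-- ===== PRECONDITION & SPEC =====
def Spec_fix_columns_cases (cols_to_fix : List String) (cols_to_return : List String) (out : List String) : Prop := out = fix_columns_cases_alt cols_to_fix cols_to_return
instance (cols_to_fix : List String) (cols_to_return : List String) (out : List String) : Decidable (Spec_fix_columns_cases cols_to_fix cols_to_return out) := by unfold Spec_fix_columns_cases; infer_instance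

-- ===== CLAIM =====
def Claim_equal_fix_columns_cases : Prop := ∀ (cols_to_fix : List String) (cols_to_return : List String), Dom_fix_columns_cases cols_to_fix cols_to_return → Spec_fix_columns_cases cols_to_fix cols_to_return (fix_columns_cases cols_to_fix cols_to_return)

-- ===== LEMMAS AND PROOFS =====

-- zipping a mapped list with its source pairs each element with its image
theorem zip_map_self {α β : Type} (l : List α) (f : α → β) :
    (l.map f).zip l = l.map (fun x => (f x, x)) := by
  induction l with
  | nil => rfl
  | cons a l ih => simp [ih]

-- the slot array stays a pointwise map of the targets throughout the fold
theorem slots_fold (r : List String) (targets : List String) (g : String → Option String) :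
    r.foldl
      (fun slots col =>
        let low := PySem.Str.lower col
        (slots.zip targets).map (fun p => if p.2 == low then some col else p.1))
      (targets.map g)
    = targets.map (fun t =>
        r.foldl (fun acc c => if t == PySem.Str.lower c then some c else acc) (g t)) := by
  induction r generalizing g with
  | nil => rfl
  | cons c r ih =>
      simp only [List.foldl_cons, zip_map_self, List.map_map]
      exact ih (fun t => if t == PySem.Str.lower c then some c else g t)

-- A's dict lookup computes the last match over the build list
theorem get?_foldl_insert_lower (r : List String) (d0 : PySem.Dict String String) (k : String) :
    (r.foldl (fun d c => d.insert (PySem.Str.lower c) c) d0).get? k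
      = r.foldl (fun acc c => if k == PySem.Str.lower c then some c else acc) (d0.get? k) := by
  induction r generalizing d0 with
  | nil => rfl
  | cons c r ih =>
      simp only [List.foldl_cons, ih]
      congr 1
      rw [PySem.Dict.get?_insert]
      by_cases h : PySem.Str.lower c = k
      · simp [h]
      · simp [Ne.symm h]

-- ===== VERDICT =====
theorem fix_columns_cases_spec : Claim_equal_fix_columns_cases := by
  intro f r _
  unfold Spec_fix_columns_cases
  simp only [fix_columns_cases, fix_columns_cases_alt]
  rw [slots_fold r (f.map PySem.Str.lower) (fun _ => (none : Option String))]
  simp only [List.foldl_map]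
  congr 1
  funext columns t
  rw [get?_foldl_insert_lower, PySem.Dict.get?_empty]
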